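-- pv_equiv track=rewrite | github.com/RevansChen/online-judge | Codewars/7kyu/mutate-my-strings/Python/solutions1.py | mutate_my_strings
-- ===== SOURCE A (Python) =====
-- def mutate_my_strings(s1, s2):
--     results = []
--     # 只替換同位置但字不同的部分, 0 ~ n-1
--     for i in range(len(s1)):
--         if s1[i] != s2[i]:
--             results.append(s2[:i] + s1[i:])
--     # 最後一個字的處理
--     if len(results):
--         if results[-1] != s2:
--             results.append(s2)
--     else:
--         results.append(s2)
--
--     # 每一個結果結尾都用'\n'分隔
--     return '\n'.join(results) + '\n'
-- ===== SOURCE B (Python) =====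
-- def mutate_my_strings(s1, s2):
--     # build the joined output directly, carrying the mutated prefix (always s2[:i])
--     out = ''
--     pre = ''
--     for i in range(len(s1)):
--         if s1[i] != s2[i]:
--             out += pre + s1[i:] + '\n'
--             pre += s2[i]
--         else:
--             pre += s1[i]
--     return out + s2 + '\n'
-- ===== Notes on version B (the rewrite author's own statement) =====
-- stated objective: alternative
-- what changed: B builds the newline-joined output string directly in one accumulator while carrying the mutated prefix (pre is always s2[:i]), instead of A's list of slice-reconstructed results s2[:i]+s1[i:] followed by a join and a trailing results[-1] != s2 check (provably always true under Pre_).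
import Mathlib
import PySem

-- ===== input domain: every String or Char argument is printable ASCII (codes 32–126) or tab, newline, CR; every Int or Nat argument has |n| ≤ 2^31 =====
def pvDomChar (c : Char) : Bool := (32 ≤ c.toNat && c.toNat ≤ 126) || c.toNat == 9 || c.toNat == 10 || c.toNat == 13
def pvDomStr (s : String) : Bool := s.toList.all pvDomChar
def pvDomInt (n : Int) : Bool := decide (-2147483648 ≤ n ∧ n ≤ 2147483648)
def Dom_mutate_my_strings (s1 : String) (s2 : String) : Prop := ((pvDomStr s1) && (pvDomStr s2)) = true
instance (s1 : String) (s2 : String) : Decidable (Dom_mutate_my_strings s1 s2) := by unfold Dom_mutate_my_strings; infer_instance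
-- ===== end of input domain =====

-- B builds the newline-joined output string directly while carrying the mutated
-- prefix, instead of A's list of slice-reconstructed results with a join and a
-- trailing results[-1] != s2 check (always true under Pre_); objective: simpler.

-- ===== PORT A =====
-- loop body of A: if s1[i] != s2[i]: results.append(s2[:i] + s1[i:])
-- (indexing with getD is exact under Pre_: i < len s1 ≤ len s2; slices with
--  nonnegative in-range bounds are take/drop, exact)
def mutate_my_strings (s1 : String) (s2 : String) : String :=
  let l1 := s1.toList
  let l2 := s2.toList
  let results := (List.range l1.length).foldl
    (fun rs i => if l1.getD i ' ' != l2.getD i ' ' then rs ++ [l2.take i ++ l1.drop i] else rs) []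
  let results :=
    if results.length ≠ 0 then
      if results.getLast? ≠ some l2 then results ++ [l2] else results
    else results ++ [l2]
  String.ofList (PySem.Chars.join ['\n'] results ++ ['\n'])

-- ===== PORT B =====
-- loop body of B over state (out, pre):
--   if s1[i] != s2[i]: out += pre + s1[i:] + '\n'; pre += s2[i]  else: pre += s1[i]
def pvStepB (l1 l2 : List Char) (st : List Char × List Char) (i : Nat) :
    List Char × List Char :=
  if l1.getD i ' ' != l2.getD i ' ' then
    (st.1 ++ (st.2 ++ l1.drop i ++ ['\n']), st.2 ++ [l2.getD i ' '])
  else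
    (st.1, st.2 ++ [l1.getD i ' '])

def mutate_my_strings_alt (s1 : String) (s2 : String) : String :=
  let l1 := s1.toList
  let l2 := s2.toList
  let st := (List.range l1.length).foldl (pvStepB l1 l2) ([], [])
  String.ofList (st.1 ++ l2 ++ ['\n'])

-- ===== PRECONDITION & SPEC =====
-- A raises IndexError (reading s2[i]) whenever len(s1) > len(s2); Pre_ excludes exactly those inputs.
def Pre_mutate_my_strings (s1 : String) (s2 : String) : Prop :=
  s1.toList.length ≤ s2.toList.length
instance (s1 : String) (s2 : String) : Decidable (Pre_mutate_my_strings s1 s2) := by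
  unfold Pre_mutate_my_strings; infer_instance

def pvWitness_mutate_my_strings : String × String := ("abc", "axc")

def Spec_mutate_my_strings (s1 : String) (s2 : String) (out : String) : Prop := out = mutate_my_strings_alt s1 s2
instance (s1 : String) (s2 : String) (out : String) : Decidable (Spec_mutate_my_strings s1 s2 out) := by unfold Spec_mutate_my_strings; infer_instance

-- ===== CLAIM (what is proved, stated in full; the proofs are below) =====
def Claim_equal_mutate_my_strings : Prop := ∀ (s1 : String) (s2 : String), Dom_mutate_my_strings s1 s2 → Pre_mutate_my_strings s1 s2 → Spec_mutate_my_strings s1 s2 (mutate_my_strings s1 s2)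

-- ===== LEMMAS AND PROOFS =====

-- Invariant of B's loop: after n steps, pre = s2[:n] and out is the concatenation of
-- line + '\n' over the mismatch indices below n.
lemma pv_loopB_inv (l1 l2 : List Char) (h : l1.length ≤ l2.length) :
    ∀ n, n ≤ l1.length →
      (List.range n).foldl (pvStepB l1 l2) ([], []) =
        (((List.range n).filter (fun j => l1.getD j ' ' != l2.getD j ' ')).flatMap
            (fun j => l2.take j ++ l1.drop j ++ ['\n']),
          l2.take n) := by
  intro n
  induction n with
  | zero => simp
  | succ n ih =>
    intro hn
    have hn1 : n < l1.length := hn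
    have hn2 : n < l2.length := lt_of_lt_of_le hn1 h
    have htake : l2.take (n + 1) = l2.take n ++ [l2.getD n ' '] := by
      rw [List.getD_eq_getElem l2 ' ' hn2, List.take_add_one,
        List.getElem?_eq_getElem hn2]
      rfl
    rw [List.range_succ, List.foldl_append, ih (le_of_lt hn1),
      List.filter_append, List.flatMap_append]
    simp only [List.foldl_cons, List.foldl_nil, List.filter_cons, List.filter_nil,
      pvStepB]
    by_cases hc : l1.getD n ' ' = l2.getD n ' '
    · have hb : (l1.getD n ' ' != l2.getD n ' ') = false := bne_eq_false_iff_eq.mpr hc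
      simp only [hb, Bool.false_eq_true, if_false]
      rw [hc, ← htake]
      simp
    · have hb : (l1.getD n ' ' != l2.getD n ' ') = true := bne_iff_ne.mpr hc
      simp only [hb, if_true]
      rw [← htake]
      simp
-- every mutation line of A's loop differs from l2 (it is shorter, or keeps l1's
-- character at the mismatch index)
lemma pv_line_ne (l1 l2 : List Char) (h : l1.length ≤ l2.length) (i : Nat)
    (hi : i < l1.length) (hc : l1.getD i ' ' ≠ l2.getD i ' ') :
    l2.take i ++ l1.drop i ≠ l2 := by
  intro heq
  have hi2 : i < l2.length := lt_of_lt_of_le hi h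
  have htake : (l2.take i).length = i := List.length_take_of_le hi2.le
  have hlen : (l2.take i ++ l1.drop i).length = l1.length := by
    rw [List.length_append, htake, List.length_drop]; omega
  have hn3 : i < (l2.take i ++ l1.drop i).length := by omega
  have hget : (l2.take i ++ l1.drop i)[i] = l1[i] := by
    rw [List.getElem_append_right htake.le]
    simp [htake]
  apply hc
  rw [List.getD_eq_getElem l1 ' ' hi, List.getD_eq_getElem l2 ' ' hi2, ← hget]
  exact List.getElem_of_eq heq hn3

-- '\n'.join(rs + [last]) + '\n' concatenated out as a flatMap of line + '\n'
lemma pv_join_flat (rs : List (List Char)) (last : List Char) :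
    PySem.Chars.join ['\n'] (rs ++ [last]) ++ ['\n'] =
      rs.flatMap (fun x => x ++ ['\n']) ++ (last ++ ['\n']) := by
  induction rs with
  | nil => simp [PySem.Chars.join_singleton]
  | cons a rs ih =>
    rcases rs with _ | ⟨b, rs⟩
    · simp [PySem.Chars.join_cons_cons, PySem.Chars.join_singleton]
    · simp only [List.cons_append] at ih ⊢
      rw [PySem.Chars.join_cons_cons]
      simp only [List.flatMap_cons, List.append_assoc]
      rw [ih]
      simp

-- ===== VERDICT (by name: the statement is the Claim_ definition above) =====
theorem mutate_my_strings_spec : Claim_equal_mutate_my_strings := by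
  intro s1 s2 _hdom hpre
  unfold Spec_mutate_my_strings mutate_my_strings mutate_my_strings_alt
  dsimp only
  have h : s1.toList.length ≤ s2.toList.length := hpre
  set l1 := s1.toList
  set l2 := s2.toList
  rw [pv_loopB_inv l1 l2 h l1.length le_rfl,
    PySem.List.foldl_append_if (fun i => l1.getD i ' ' != l2.getD i ' ')
      (fun i => l2.take i ++ l1.drop i), List.nil_append]
  set fl := (List.range l1.length).filter (fun j => l1.getD j ' ' != l2.getD j ' ') with hfl
  set rs := fl.map (fun j => l2.take j ++ l1.drop j) with hrs
  have hflat : rs.flatMap (fun x => x ++ ['\n']) =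
      fl.flatMap (fun j => l2.take j ++ l1.drop j ++ ['\n']) := by
    rw [hrs, List.flatMap_map]
  have hres : (if rs.length ≠ 0 then
      if rs.getLast? ≠ some l2 then rs ++ [l2] else rs
    else rs ++ [l2]) = rs ++ [l2] := by
    by_cases hempty : rs = []
    · simp [hempty]
    · have hlast : rs.getLast? ≠ some l2 := by
        rw [List.getLast?_eq_some_getLast hempty]
        simp only [ne_eq, Option.some.injEq]
        have hmem := List.getLast_mem hempty
        rcases List.mem_map.mp hmem with ⟨j, hj, hval⟩
        rcases List.mem_filter.mp hj with ⟨hjr, hjc⟩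
        have hjlt : j < l1.length := List.mem_range.mp hjr
        rw [← hval]
        exact pv_line_ne l1 l2 h j hjlt (by simpa using hjc)
      have hl0 : rs.length ≠ 0 := fun h0 => hempty (List.length_eq_zero_iff.mp h0)
      simp [hl0, hlast]
  rw [hres, pv_join_flat, hflat]
  simp
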